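-- pv_equiv track=rewrite | github.com/RakeshP97/Python | mfa2.py | get_longest_sorted
-- ===== SOURCE A (Python) =====
-- def get_longest_sorted(s):
--     '''
--     s: string of lower -case letters without spaces
--     returns the longest substring of s sorted in alphabetical order
--     '''
--     longetAscendingStr = ''
--     currentLongestStr = s[0]
--     for i in range(1,len(s)):
--         if s[i-1] <= s[i]:
--             currentLongestStr += s[i]
--         else:
--             if len(longetAscendingStr) < len(currentLongestStr):
--                 longetAscendingStr = currentLongestStr
--             currentLongestStr=s[i]
--     if len(longetAscendingStr) < len(currentLongestStr):
--         longetAscendingStr = currentLongestStr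
--     return longetAscendingStr
-- ===== SOURCE B (Python) =====
-- def get_longest_sorted(s):
--     '''
--     s: string of lower -case letters without spaces
--     returns the longest substring of s sorted in alphabetical order
--     '''
--     # Binary search on the answer LENGTH: a sorted window of length L exists
--     # iff L <= the maximal one, so the feasibility predicate is monotone.
--     # first_ok(L) finds the leftmost sorted window of length L in O(n) by
--     # skipping every start that would cover the descent just found.
--     n = len(s)
--
--     def first_ok(L):
--         # smallest start whose window s[start:start+L] is sorted, else -1
--         st = 0
--         while st + L <= n:
--             j = st
--             while j + 1 < st + L and s[j] <= s[j + 1]: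
--                 j += 1
--             if st + L <= j + 1:
--                 return st
--             st = j + 1  # any start in (st, j] still covers the descent at j
--         return -1
--
--     lo, hi = 1, n
--     while lo < hi:
--         mid = (lo + hi + 1) // 2
--         if first_ok(mid) >= 0:
--             lo = mid
--         else:
--             hi = mid - 1
--     st = first_ok(lo)
--     return s[st:st + lo]
-- ===== Notes on version B (the rewrite author's own statement) =====
-- stated objective: alternative
-- what changed: B binary-searches the answer length (feasibility 'some sorted window of length L exists' is monotone in L) with a leftmost-sorted-window scan that skips past each descent, then slices the leftmost window of the maximal length, instead of A's single left-to-right pass accumulating the current and best run.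
import Mathlib
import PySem

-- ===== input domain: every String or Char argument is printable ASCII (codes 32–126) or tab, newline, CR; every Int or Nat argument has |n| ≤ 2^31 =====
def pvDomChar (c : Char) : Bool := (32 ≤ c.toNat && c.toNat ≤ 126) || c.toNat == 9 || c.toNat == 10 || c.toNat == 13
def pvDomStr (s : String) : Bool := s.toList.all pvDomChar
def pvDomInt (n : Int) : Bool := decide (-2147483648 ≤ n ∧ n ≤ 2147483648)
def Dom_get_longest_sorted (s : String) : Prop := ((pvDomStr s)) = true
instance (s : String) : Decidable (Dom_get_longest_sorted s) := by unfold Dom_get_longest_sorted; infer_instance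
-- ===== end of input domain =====

-- B replaces A's single best-run-so-far pass by a binary search on the answer length
-- with a leftmost-sorted-window scan (alternative decomposition; return value only).

-- ===== PORT A =====
-- A's loop over range(1, len(s)): state (longetAscendingStr, currentLongestStr),
-- comparing s[i-1] (carried as `prev`) with s[i].
def aLoop (longest cur : List Char) (prev : Char) (rest : List Char) : List Char × List Char :=
  match rest with
  | [] => (longest, cur)
  | c :: t =>
    if prev ≤ c then aLoop longest (cur ++ [c]) c t
    else if longest.length < cur.length then aLoop cur [c] c t
    else aLoop longest [c] c t

def get_longest_sorted (s : String) : String :=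
  match s.toList with
  | [] => ""            -- Python: s[0] raises IndexError here (excluded by Pre_)
  | c :: t =>
    let p := aLoop [] [c] c t
    String.ofList (if p.1.length < p.2.length then p.2 else p.1)

-- ===== PORT B =====
-- Source B's inner `while j + 1 < st + L and s[j] <= s[j+1]: j += 1`; the loop counter
-- `fuel` is the number of remaining iterations st + L - (j + 1), kept in sync with j.
def firstDesc (l : List Char) (fuel j : Nat) : Nat :=
  match fuel with
  | 0 => j
  | fuel + 1 => if l.getD j 'a' ≤ l.getD (j + 1) 'a' then firstDesc l fuel (j + 1) else j

-- Source B's outer while of first_ok(L): skip to j + 1 after the descent at j; the loop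
-- variable st strictly increases, so l.length + 1 - st bounds the remaining iterations.
def firstOk (l : List Char) (L : Nat) (fuel st : Nat) : Int :=
  match fuel with
  | 0 => -1
  | fuel + 1 =>
    if st + L ≤ l.length then
      let j := firstDesc l (L - 1) st
      if st + L ≤ j + 1 then (st : Int) else firstOk l L fuel (j + 1)
    else -1

-- Source B's binary-search loop: lo, hi with mid = (lo + hi + 1) // 2; hi - lo shrinks
-- every iteration, so it bounds the number of remaining iterations.
def bsearch (l : List Char) (fuel lo hi : Nat) : Nat :=
  match fuel with
  | 0 => lo
  | fuel + 1 =>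
    if lo < hi then
      let mid := (lo + hi + 1) / 2
      if 0 ≤ firstOk l mid (l.length + 1) 0 then bsearch l fuel mid hi
      else bsearch l fuel lo (mid - 1)
    else lo

def get_longest_sorted_alt (s : String) : String :=
  let l := s.toList
  let L := bsearch l (l.length - 1) 1 l.length
  let st := firstOk l L (l.length + 1) 0
  String.ofList (PySem.List.slice l (some st) (some (st + (L : Int))))  -- s[st:st+lo]

-- ===== PRECONDITION & SPEC =====
-- A raises IndexError via s[0] on the empty string; every other string is accepted.
def Pre_get_longest_sorted (s : String) : Prop := s ≠ ""
instance (s : String) : Decidable (Pre_get_longest_sorted s) := by unfold Pre_get_longest_sorted; infer_instance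
def pvWitness_get_longest_sorted : String := "azbcdy"

def Spec_get_longest_sorted (s : String) (out : String) : Prop := out = get_longest_sorted_alt s
instance (s : String) (out : String) : Decidable (Spec_get_longest_sorted s out) := by unfold Spec_get_longest_sorted; infer_instance

-- ===== CLAIM (what is proved, stated in full; the proofs are below) =====
def Claim_equal_get_longest_sorted : Prop := ∀ (s : String), Dom_get_longest_sorted s → Pre_get_longest_sorted s → Spec_get_longest_sorted s (get_longest_sorted s)


-- ===== LEMMAS AND PROOFS =====

-- A's runs decomposition, used only by the proofs: the maximal non-decreasing runs.
def altRuns (run : List Char) (rest : List Char) : List (List Char) :=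
  match rest with
  | [] => [run]
  | ch :: t =>
    if (PySem.List.pyGet? run (-1)).getD ' ' ≤ ch then
      altRuns (run ++ [ch]) t
    else
      run :: altRuns [ch] t

-- A's "keep the longer, earliest on ties" selection, folded over a list of runs.
def pickBest (b : List Char) (rs : List (List Char)) : List Char :=
  rs.foldl (fun b r => if b.length < r.length then r else b) b

-- sortedness of the window [st, st+L) of l
def OkW (l : List Char) (st L : Nat) : Prop :=
  ∀ k, st ≤ k → k + 1 < st + L → l.getD k 'a' ≤ l.getD (k + 1) 'a'

-- strict descent between the last char of one run and the head of the next
def RunBdy (a b : List Char) : Prop := ∀ x ∈ a.getLast?, ∀ y ∈ b.head?, y < x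

theorem pyGet_last_append (xs : List Char) (a : Char) :
    (PySem.List.pyGet? (xs ++ [a]) (-1)).getD ' ' = a := by
  simp [PySem.List.pyGet?, PySem.List.pyIdx?]

-- A's loop followed by its final comparison equals pickBest over the runs,
-- provided `prev` is the last character of `cur`.
theorem aLoop_eq_pickBest (rest : List Char) :
    ∀ (longest cur : List Char) (prev : Char),
      (PySem.List.pyGet? cur (-1)).getD ' ' = prev →
      (if (aLoop longest cur prev rest).1.length < (aLoop longest cur prev rest).2.length
        then (aLoop longest cur prev rest).2 else (aLoop longest cur prev rest).1)
        = pickBest longest (altRuns cur rest) := by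
  induction rest with
  | nil => intro longest cur prev h; simp [aLoop, altRuns, pickBest]
  | cons c t ih =>
    intro longest cur prev h
    by_cases hle : prev ≤ c
    · have hcur : (PySem.List.pyGet? (cur ++ [c]) (-1)).getD ' ' = c := pyGet_last_append cur c
      simp [aLoop, altRuns, h, hle, ih _ _ _ hcur]
    · have hc : (PySem.List.pyGet? [c] (-1)).getD ' ' = c := pyGet_last_append [] c
      by_cases hlen : longest.length < cur.length
      · simp [aLoop, altRuns, h, hle, hlen, pickBest, ih _ _ _ hc]
      · simp [aLoop, altRuns, h, hle, hlen, pickBest, ih _ _ _ hc]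

-- ---- properties of the runs decomposition ----

theorem altRuns_flatten (rest : List Char) :
    ∀ run, (altRuns run rest).flatten = run ++ rest := by
  induction rest with
  | nil => intro run; simp [altRuns]
  | cons ch t ih =>
    intro run
    by_cases h : (PySem.List.pyGet? run (-1)).getD ' ' ≤ ch
    · simp [altRuns, h, ih]
    · simp [altRuns, h, ih]

theorem altRuns_first (rest : List Char) :
    ∀ run, ∃ ext rs', altRuns run rest = (run ++ ext) :: rs' := by
  induction rest with
  | nil => intro run; exact ⟨[], [], by simp [altRuns]⟩
  | cons ch t ih =>
    intro run
    by_cases h : (PySem.List.pyGet? run (-1)).getD ' ' ≤ ch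
    · obtain ⟨ext, rs', he⟩ := ih (run ++ [ch])
      exact ⟨ch :: ext, rs', by simp [altRuns, h, he]⟩
    · exact ⟨[], altRuns [ch] t, by simp [altRuns, h]⟩

theorem altRuns_ne (rest : List Char) :
    ∀ ys a, ∀ r ∈ altRuns (ys ++ [a]) rest, r ≠ [] := by
  induction rest with
  | nil => intro ys a r hr; simp [altRuns] at hr; subst hr; simp
  | cons ch t ih =>
    intro ys a r hr
    rw [altRuns, pyGet_last_append] at hr
    by_cases h : a ≤ ch
    · rw [if_pos h] at hr
      exact ih (ys ++ [a]) ch r (by simpa using hr)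
    · rw [if_neg h] at hr
      rcases List.mem_cons.mp hr with h1 | h2
      · subst h1; simp
      · exact ih [] ch r (by simpa using h2)

theorem altRuns_sorted (rest : List Char) :
    ∀ ys a, List.IsChain (· ≤ ·) (ys ++ [a]) →
      ∀ r ∈ altRuns (ys ++ [a]) rest, List.IsChain (· ≤ ·) r := by
  induction rest with
  | nil => intro ys a hs r hr; simp [altRuns] at hr; subst hr; exact hs
  | cons ch t ih =>
    intro ys a hs r hr
    rw [altRuns, pyGet_last_append] at hr
    by_cases h : a ≤ ch
    · rw [if_pos h] at hr
      refine ih (ys ++ [a]) ch ?_ r (by simpa using hr)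
      rw [List.isChain_append]
      refine ⟨hs, by simp, ?_⟩
      intro x hx y hy
      simp at hy; subst hy
      rw [List.getLast?_append] at hx
      simp at hx; subst hx; exact h
    · rw [if_neg h] at hr
      rcases List.mem_cons.mp hr with h1 | h2
      · subst h1; exact hs
      · exact ih [] ch (by simp) r (by simpa using h2)

theorem altRuns_bdy (rest : List Char) :
    ∀ ys a, List.IsChain RunBdy (altRuns (ys ++ [a]) rest) := by
  induction rest with
  | nil => intro ys a; simp [altRuns]
  | cons ch t ih =>
    intro ys a
    rw [altRuns, pyGet_last_append]
    by_cases h : a ≤ ch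
    · rw [if_pos h]; exact ih (ys ++ [a]) ch
    · rw [if_neg h]
      rw [List.isChain_cons]
      constructor
      · obtain ⟨ext, rs', he⟩ := altRuns_first t ([] ++ [ch])
        simp only [List.nil_append] at he
        refine fun b hb => ?_
        rw [he] at hb; simp at hb; subst hb
        intro x hx y hy
        rw [List.getLast?_append] at hx
        simp at hx hy; subst hx; subst hy; exact not_le.mp h
      · have := ih [] ch; simpa using this

-- ---- properties of pickBest ----

theorem pickBest_len (rs : List (List Char)) :
    ∀ b, b.length ≤ (pickBest b rs).length ∧ ∀ r ∈ rs, r.length ≤ (pickBest b rs).length := by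
  induction rs with
  | nil => intro b; simp [pickBest]
  | cons x t ih =>
    intro b
    by_cases h : b.length < x.length
    · have hx : pickBest b (x :: t) = pickBest x t := by simp [pickBest, h]
      have hi := ih x
      refine ⟨by rw [hx]; omega, ?_⟩
      intro r hr
      rcases List.mem_cons.mp hr with h1 | h2
      · subst h1; rw [hx]; exact hi.1
      · rw [hx]; exact hi.2 r h2
    · have hx : pickBest b (x :: t) = pickBest b t := by simp [pickBest, h]
      have hi := ih b
      refine ⟨by rw [hx]; exact hi.1, ?_⟩
      intro r hr
      rcases List.mem_cons.mp hr with h1 | h2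
      · subst h1; rw [hx]; have h1 := hi.1; omega
      · rw [hx]; exact hi.2 r h2

theorem pickBest_dec (rs : List (List Char)) :
    ∀ b, pickBest b rs = b ∨
      ∃ pre suf, rs = pre ++ pickBest b rs :: suf ∧
        (∀ r ∈ pre, r.length < (pickBest b rs).length) ∧
        b.length < (pickBest b rs).length := by
  induction rs with
  | nil => intro b; left; simp [pickBest]
  | cons x t ih =>
    intro b
    by_cases h : b.length < x.length
    · have hx : pickBest b (x :: t) = pickBest x t := by simp [pickBest, h]
      rcases ih x with h1 | ⟨pre, suf, he, hpre, hlen⟩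
      · right
        refine ⟨[], t, ?_, by simp, by rw [hx, h1]; exact h⟩
        rw [hx, h1]; simp
      · right
        refine ⟨x :: pre, suf, ?_, ?_, by rw [hx]; omega⟩
        · rw [hx]; rw [List.cons_append]; exact congrArg (x :: ·) he
        · intro r hr
          rcases List.mem_cons.mp hr with h1 | h2
          · subst h1; rw [hx]; omega
          · rw [hx]; exact hpre r h2
    · have hx : pickBest b (x :: t) = pickBest b t := by simp [pickBest, h]
      rcases ih b with h1 | ⟨pre, suf, he, hpre, hlen⟩
      · left; rw [hx, h1]
      · right
        refine ⟨x :: pre, suf, ?_, ?_, by rw [hx]; omega⟩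
        · rw [hx]; rw [List.cons_append]; exact congrArg (x :: ·) he
        · intro r hr
          rcases List.mem_cons.mp hr with h1 | h2
          · subst h1; rw [hx]; omega
          · rw [hx]; exact hpre r h2

-- ---- windows vs runs ----

theorem flatten_take_mono (rs : List (List Char)) (i j : Nat) (h : i ≤ j) :
    ((rs.take i).flatten).length ≤ ((rs.take j).flatten).length := by
  have hsplit : rs.take j = rs.take i ++ ((rs.take j).drop i) := by
    conv_lhs => rw [← List.take_append_drop i (rs.take j)]
    rw [List.take_take, min_eq_left h]
  rw [hsplit, List.flatten_append, List.length_append]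
  omega

theorem okw_of_chain (x P y : List Char) (h : List.IsChain (· ≤ ·) P) :
    OkW (x ++ (P ++ y)) x.length P.length := by
  intro k hk hk2
  have h1 : (x ++ (P ++ y)).getD k 'a' = P.getD (k - x.length) 'a' := by
    rw [List.getD_append_right _ _ _ _ hk]
    rw [List.getD_append _ _ _ _ (by omega)]
  have h2 : (x ++ (P ++ y)).getD (k + 1) 'a' = P.getD (k + 1 - x.length) 'a' := by
    rw [List.getD_append_right _ _ _ _ (by omega)]
    rw [List.getD_append _ _ _ _ (by omega)]
  rw [h1, h2]
  have hlt : (k - x.length) + 1 < P.length := by omega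
  have hc := (List.isChain_iff_getElem.mp h) (k - x.length) hlt
  rw [List.getD_eq_getElem _ _ (by omega), List.getD_eq_getElem _ _ (by omega)]
  have he : k + 1 - x.length = (k - x.length) + 1 := by omega
  simp_rw [he]
  exact hc

theorem cross (rs : List (List Char)) (hne : ∀ r ∈ rs, r ≠ [])
    (hb : List.IsChain RunBdy rs) :
    ∀ st L, 1 ≤ L → st + L ≤ rs.flatten.length → OkW rs.flatten st L →
      ∃ pre r suf, rs = pre ++ r :: suf ∧ pre.flatten.length ≤ st ∧
        st + L ≤ pre.flatten.length + r.length := by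
  induction rs with
  | nil =>
    intro st L hL hlen _
    simp at hlen; omega
  | cons r rs' ih =>
    intro st L hL hlen hok
    have hraw : (r :: rs').flatten = r ++ rs'.flatten := by simp
    have hflen : (r :: rs').flatten.length = r.length + rs'.flatten.length := by
      rw [hraw, List.length_append]
    by_cases hcase1 : st + L ≤ r.length
    · exact ⟨[], r, rs', rfl, by simp, by simpa using hcase1⟩
    · by_cases hcase2 : r.length ≤ st
      · -- window lies entirely in the tail; recurse with shifted indices
        have hok' : OkW rs'.flatten (st - r.length) L := by
          intro k hk hk2
          have h0 := hok (r.length + k) (by omega) (by omega)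
          rw [hraw, List.getD_append_right _ _ _ _ (by omega),
              List.getD_append_right _ _ _ _ (by omega)] at h0
          have e1 : r.length + k - r.length = k := by omega
          have e2 : r.length + k + 1 - r.length = k + 1 := by omega
          rw [e1, e2] at h0
          exact h0
        have hlen' : (st - r.length) + L ≤ rs'.flatten.length := by omega
        obtain ⟨pre, rr, suf, he, h3, h4⟩ :=
          ih (fun x hx => hne x (List.mem_cons_of_mem r hx))
             ((List.isChain_cons.mp hb).2) (st - r.length) L hL hlen' hok'
        have hpl : ((r :: pre).flatten).length = r.length + pre.flatten.length := by
          rw [show (r :: pre).flatten = r ++ pre.flatten by simp, List.length_append]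
        refine ⟨r :: pre, rr, suf, ?_, ?_, ?_⟩
        · rw [he]; simp
        · rw [hpl]; omega
        · rw [hpl]; omega
      · -- the window crosses the boundary after r: contradiction
        exfalso
        have hrne : r ≠ [] := hne r (List.mem_cons_self ..)
        have hrlen : 1 ≤ r.length := List.length_pos_iff.mpr hrne
        cases hrs' : rs' with
        | nil =>
          have hz : rs'.flatten.length = 0 := by rw [hrs']; simp
          omega
        | cons r1 rs'' =>
          have hr1ne : r1 ≠ [] := hne r1 (by rw [hrs']; simp)
          have hr1len : 1 ≤ r1.length := List.length_pos_iff.mpr hr1ne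
          have hasc := hok (r.length - 1) (by omega) (by omega)
          have hflat : (r :: rs').flatten = r ++ (r1 ++ rs''.flatten) := by
            rw [hrs']; simp
          rw [hflat, List.getD_append _ _ _ _ (by omega)] at hasc
          have e3 : r.length - 1 + 1 = r.length := by omega
          rw [e3, List.getD_append_right _ _ _ _ (le_refl _), Nat.sub_self,
              List.getD_append _ _ _ _ (by omega)] at hasc
          -- boundary descent from the chain
          have hbd : RunBdy r r1 := by
            have hc := (List.isChain_cons.mp hb).1
            rw [hrs'] at hc
            exact hc r1 (by simp)
          have hlast : r.getLast? = some (r.getD (r.length - 1) 'a') := by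
            rw [List.getLast?_eq_some_getLast hrne, List.getLast_eq_getElem,
                List.getD_eq_getElem _ _ (by omega)]
          have hhead : r1.head? = some (r1.getD 0 'a') := by
            rw [List.head?_eq_some_head hr1ne, List.head_eq_getElem,
                List.getD_eq_getElem _ _ (by omega)]
          have hlt := hbd (r.getD (r.length - 1) 'a') (by rw [hlast]; rfl)
            (r1.getD 0 'a') (by rw [hhead]; rfl)
          exact absurd hasc (not_le.mpr hlt)

-- ---- firstDesc / firstOk / bsearch characterisations ----

theorem firstDesc_ge (l : List Char) : ∀ fuel j, j ≤ firstDesc l fuel j := by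
  intro fuel
  induction fuel with
  | zero => intro j; simp [firstDesc]
  | succ fuel ih =>
    intro j
    rw [firstDesc]
    by_cases h : l.getD j 'a' ≤ l.getD (j + 1) 'a'
    · rw [if_pos h]; have := ih (j + 1); omega
    · rw [if_neg h]

theorem firstDesc_asc (l : List Char) :
    ∀ fuel j m, j ≤ m → m < firstDesc l fuel j → l.getD m 'a' ≤ l.getD (m + 1) 'a' := by
  intro fuel
  induction fuel with
  | zero => intro j m h1 h2; rw [firstDesc] at h2; omega
  | succ fuel ih =>
    intro j m h1 h2
    rw [firstDesc] at h2
    by_cases h : l.getD j 'a' ≤ l.getD (j + 1) 'a'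
    · rw [if_pos h] at h2
      rcases Nat.eq_or_lt_of_le h1 with he | hlt
      · subst he; exact h
      · exact ih (j + 1) m hlt h2
    · rw [if_neg h] at h2; omega

theorem firstDesc_desc (l : List Char) :
    ∀ fuel j, firstDesc l fuel j < j + fuel →
      ¬ l.getD (firstDesc l fuel j) 'a' ≤ l.getD (firstDesc l fuel j + 1) 'a' := by
  intro fuel
  induction fuel with
  | zero => intro j h; rw [firstDesc] at h; omega
  | succ fuel ih =>
    intro j h
    rw [firstDesc]
    by_cases hc : l.getD j 'a' ≤ l.getD (j + 1) 'a'
    · rw [if_pos hc]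
      refine ih (j + 1) ?_
      rw [firstDesc, if_pos hc] at h; omega
    · rw [if_neg hc]; exact hc

theorem firstOk_spec (l : List Char) (L : Nat) :
    ∀ fuel st, l.length + 1 ≤ fuel + st →
      (firstOk l L fuel st = -1 ∧ ∀ s', st ≤ s' → s' + L ≤ l.length → ¬ OkW l s' L)
      ∨ (∃ r : Nat, firstOk l L fuel st = (r : Int) ∧ st ≤ r ∧ r + L ≤ l.length ∧ OkW l r L ∧
          ∀ s', st ≤ s' → s' < r → ¬ OkW l s' L) := by
  intro fuel
  induction fuel with
  | zero =>
    intro st hf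
    left
    refine ⟨by rw [firstOk], ?_⟩
    intro s' hs hsn
    omega
  | succ fuel ih =>
    intro st hf
    by_cases hn : st + L ≤ l.length
    · by_cases hle : st + L ≤ firstDesc l (L - 1) st + 1
      · right
        refine ⟨st, ?_, le_refl _, hn, ?_, by omega⟩
        · rw [firstOk, if_pos hn]
          show (if st + L ≤ firstDesc l (L - 1) st + 1 then (st : Int)
                else firstOk l L fuel (firstDesc l (L - 1) st + 1)) = (st : Int)
          rw [if_pos hle]
        · intro k hk hk2
          exact firstDesc_asc l (L - 1) st k hk (by omega)
      · have hjge : st ≤ firstDesc l (L - 1) st := firstDesc_ge l (L - 1) st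
        have hdesc : ¬ l.getD (firstDesc l (L - 1) st) 'a'
            ≤ l.getD (firstDesc l (L - 1) st + 1) 'a' :=
          firstDesc_desc l (L - 1) st (by omega)
        have hfail : ∀ s', st ≤ s' → s' ≤ firstDesc l (L - 1) st → ¬ OkW l s' L := by
          intro s' h1 h2 hok
          exact hdesc (hok (firstDesc l (L - 1) st) h2 (by omega))
        have heq : firstOk l L (fuel + 1) st = firstOk l L fuel (firstDesc l (L - 1) st + 1) := by
          rw [firstOk, if_pos hn]
          show (if st + L ≤ firstDesc l (L - 1) st + 1 then (st : Int)
                else firstOk l L fuel (firstDesc l (L - 1) st + 1)) = _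
          rw [if_neg hle]
        rcases ih (firstDesc l (L - 1) st + 1) (by omega) with ⟨h1, h2⟩ | ⟨r, h1, h2, h3, h4, h5⟩
        · left
          refine ⟨by rw [heq, h1], ?_⟩
          intro s' hs hsn
          by_cases hsj : s' ≤ firstDesc l (L - 1) st
          · exact hfail s' hs hsj
          · exact h2 s' (by omega) hsn
        · right
          refine ⟨r, by rw [heq, h1], by omega, h3, h4, ?_⟩
          intro s' hs hsr
          by_cases hsj : s' ≤ firstDesc l (L - 1) st
          · exact hfail s' hs hsj
          · exact h5 s' (by omega) hsr
    · left
      refine ⟨?_, ?_⟩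
      · rw [firstOk, if_neg hn]
      · intro s' hs hsn
        exact absurd hsn (by omega)

theorem bsearch_eq (l : List Char) (M : Nat) (hM : 1 ≤ M)
    (hfeas : ∀ L, 1 ≤ L → L ≤ M → 0 ≤ firstOk l L (l.length + 1) 0)
    (hinf : ∀ L, M < L → firstOk l L (l.length + 1) 0 = -1) :
    ∀ fuel lo hi, hi - lo ≤ fuel → lo ≤ M → M ≤ hi → bsearch l fuel lo hi = M := by
  intro fuel
  induction fuel with
  | zero =>
    intro lo hi hf h1 h2
    rw [bsearch]; omega
  | succ fuel ih =>
    intro lo hi hf h1 h2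
    by_cases hlt : lo < hi
    · rw [bsearch, if_pos hlt]
      show (if 0 ≤ firstOk l ((lo + hi + 1) / 2) (l.length + 1) 0
            then bsearch l fuel ((lo + hi + 1) / 2) hi
            else bsearch l fuel lo ((lo + hi + 1) / 2 - 1)) = M
      by_cases hmid : 0 ≤ firstOk l ((lo + hi + 1) / 2) (l.length + 1) 0
      · have hmle : (lo + hi + 1) / 2 ≤ M := by
          by_contra hgt
          rw [hinf _ (by omega)] at hmid
          omega
        rw [if_pos hmid]
        exact ih _ hi (by omega) hmle h2
      · have hmgt : M < (lo + hi + 1) / 2 := by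
          by_contra hle
          exact hmid (hfeas _ (by omega) (by omega))
        rw [if_neg hmid]
        exact ih lo _ (by omega) h1 (by omega)
    · rw [bsearch, if_neg hlt]
      omega

-- ===== VERDICT =====
theorem get_longest_sorted_spec : Claim_equal_get_longest_sorted := by
  intro s _ hpre
  unfold Spec_get_longest_sorted get_longest_sorted
  cases hs : s.toList with
  | nil => exact absurd (by simpa using congrArg String.ofList hs) hpre
  | cons c t =>
    have hflat : (altRuns [c] t).flatten = c :: t := by simpa using altRuns_flatten t [c]
    have hne : ∀ r ∈ altRuns [c] t, r ≠ [] := by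
      have h := altRuns_ne t [] c; simpa using h
    have hsort : ∀ r ∈ altRuns [c] t, List.IsChain (· ≤ ·) r := by
      have h := altRuns_sorted t [] c (by simp); simpa using h
    have hbdy : List.IsChain RunBdy (altRuns [c] t) := by
      have h := altRuns_bdy t [] c; simpa using h
    rcases pickBest_dec (altRuns [c] t) [] with hPb | ⟨pre, suf, hdec, hpre2, hM0⟩
    · exfalso
      obtain ⟨ext, rs', hfst⟩ := altRuns_first t [c]
      have hmem : ([c] ++ ext) ∈ altRuns [c] t := by rw [hfst]; simp
      have h := (pickBest_len (altRuns [c] t) []).2 _ hmem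
      rw [hPb] at h; simp at h
    · set P := pickBest [] (altRuns [c] t) with hP
      set M := P.length with hM
      simp only [List.length_nil] at hM0
      have hPmem : P ∈ altRuns [c] t := by rw [hdec]; simp
      have hlflat : c :: t = pre.flatten ++ (P ++ suf.flatten) := by
        rw [← hflat, hdec]; simp
      set off := pre.flatten.length with hoff
      have hlen_eq : (c :: t).length = off + (M + suf.flatten.length) := by
        have h := congrArg List.length hlflat
        simpa [List.length_append, hoff, hM] using h
      have E1 : OkW (c :: t) off M := by
        rw [hlflat, hoff, hM]
        exact okw_of_chain pre.flatten P suf.flatten (hsort P hPmem)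
      have hoffM : off + M ≤ (c :: t).length := by omega
      have E2 : ∀ L s', M < L → s' + L ≤ (c :: t).length → ¬ OkW (c :: t) s' L := by
        intro L s' hML hsl hok
        obtain ⟨pre', r, suf', he', ho1, ho2⟩ := cross (altRuns [c] t) hne hbdy s' L (by omega)
            (by rw [hflat]; exact hsl) (by rw [hflat]; exact hok)
        have hmem' : r ∈ altRuns [c] t := by rw [he']; simp
        have hrle : r.length ≤ M := by
          rw [hM, hP]; exact (pickBest_len (altRuns [c] t) []).2 r hmem'
        omega
      have E3 : ∀ s', s' < off → ¬ OkW (c :: t) s' M := by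
        intro s' hs' hok
        obtain ⟨pre', r, suf', he', ho1, ho2⟩ := cross (altRuns [c] t) hne hbdy s' M (by omega)
            (by rw [hflat]; omega) (by rw [hflat]; exact hok)
        by_cases hii : pre'.length < pre.length
        · have hidx : pre'.length < (altRuns [c] t).length := by rw [he']; simp
          have h1 : (altRuns [c] t)[pre'.length]'hidx = r := by
            rw [List.getElem_of_eq he', List.getElem_append_right (le_refl _)]
            simp
          have h2 : (altRuns [c] t)[pre'.length]'hidx = pre[pre'.length]'hii := by
            rw [List.getElem_of_eq hdec, List.getElem_append_left hii]
          have hrpre : r ∈ pre := by rw [← h1, h2]; exact List.getElem_mem _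
          have h3 := hpre2 r hrpre
          omega
        · have hmono := flatten_take_mono (altRuns [c] t) pre.length pre'.length (by omega)
          have hA : ((altRuns [c] t).take pre.length).flatten.length = off := by
            rw [hdec, List.take_left]
          have hB : ((altRuns [c] t).take pre'.length).flatten.length = pre'.flatten.length := by
            rw [he', List.take_left]
          rw [hA, hB] at hmono
          omega
      have feas : ∀ L, 1 ≤ L → L ≤ M → 0 ≤ firstOk (c :: t) L ((c :: t).length + 1) 0 := by
        intro L h1 h2
        rcases firstOk_spec (c :: t) L ((c :: t).length + 1) 0 (by omega) with ⟨hf1, hf2⟩ | ⟨r, hf1, _, _, _, _⟩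
        · exact absurd (fun k hk hk2 => E1 k hk (by omega))
            (hf2 off (by omega) (by omega))
        · rw [hf1]; exact Int.natCast_nonneg r
      have inf : ∀ L, M < L → firstOk (c :: t) L ((c :: t).length + 1) 0 = -1 := by
        intro L hML
        rcases firstOk_spec (c :: t) L ((c :: t).length + 1) 0 (by omega) with ⟨hf1, _⟩ | ⟨r, hf1, _, hf3, hf4, _⟩
        · exact hf1
        · exact absurd hf4 (E2 L r hML hf3)
      have hbs : bsearch (c :: t) ((c :: t).length - 1) 1 (c :: t).length = M :=
        bsearch_eq (c :: t) M (by omega) feas inf ((c :: t).length - 1) 1 (c :: t).length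
          (by omega) (by omega) (by omega)
      have hfo : firstOk (c :: t) M ((c :: t).length + 1) 0 = (off : Int) := by
        rcases firstOk_spec (c :: t) M ((c :: t).length + 1) 0 (by omega) with ⟨hf1, hf2⟩ | ⟨r, hf1, hf2, hf3, hf4, hf5⟩
        · exact absurd E1 (hf2 off (by omega) (by omega))
        · have hro : r = off := by
            rcases lt_trichotomy r off with hh | hh | hh
            · exact absurd hf4 (E3 r hh)
            · exact hh
            · exact absurd E1 (hf5 off (by omega) hh)
          rw [hf1, hro]
      have hBval : get_longest_sorted_alt s = String.ofList P := by
        show String.ofList (PySem.List.slice s.toList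
            (some (firstOk s.toList (bsearch s.toList (s.toList.length - 1) 1 s.toList.length)
              (s.toList.length + 1) 0))
            (some (firstOk s.toList (bsearch s.toList (s.toList.length - 1) 1 s.toList.length)
              (s.toList.length + 1) 0
              + (bsearch s.toList (s.toList.length - 1) 1 s.toList.length : Int)))) = String.ofList P
        rw [hs, hbs, hfo, PySem.List.slice_natCast_add]
        have hdrop : ((c :: t).drop off).take M = P := by
          rw [hlflat, hoff, List.drop_left, hM, List.take_left]
        rw [hdrop]
      show String.ofList (if (aLoop [] [c] c t).1.length < (aLoop [] [c] c t).2.length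
          then (aLoop [] [c] c t).2 else (aLoop [] [c] c t).1) = get_longest_sorted_alt s
      rw [aLoop_eq_pickBest t [] [c] c (pyGet_last_append [] c), hBval, ← hP]
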